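-- pv_equiv track=rewrite | github.com/matteo8p/advent-of-code-2023 | scratchcards.py | parse_scratchcard
-- ===== SOURCE A (Python) =====
-- def parse_scratchcard(scratchcard):
--     scratchcard_splits = scratchcard.split(' ')
--     winning_numbers = []
--     your_numbers = []
--
--     on_winning_numbers = True
--     for i in range(2, len(scratchcard_splits)):
--         scratchcard_splits[i] = scratchcard_splits[i].replace("\n", "")
--
--         if scratchcard_splits[i] == '|':
--             on_winning_numbers = False
--             continue
--         if scratchcard_splits[i].isnumeric():
--             if on_winning_numbers == True:
--                 winning_numbers.append(int(scratchcard_splits[i]))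
--             else:
--                 your_numbers.append(int(scratchcard_splits[i]))
--
--     return winning_numbers, your_numbers
-- ===== SOURCE B (Python) =====
-- def parse_scratchcard(scratchcard):
--     tokens = [t.replace('\n', '') for t in scratchcard.split(' ')[2:]]
--     if '|' in tokens:
--         idx = tokens.index('|')
--         first, second = tokens[:idx], tokens[idx + 1:]
--     else:
--         first, second = tokens, []
--     winning_numbers = [int(t) for t in first if t.isnumeric()]
--     your_numbers = [int(t) for t in second if t.isnumeric()]
--     return winning_numbers, your_numbers
-- ===== Notes on version B (the rewrite author's own statement) =====
-- stated objective: simpler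
-- what changed: Replaces A's stateful on_winning flag scan with a flagless decomposition: clean all tokens once, locate the '|' separator with index() to split the token list in two, and build each side by an independent filtered comprehension.
import Mathlib
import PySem

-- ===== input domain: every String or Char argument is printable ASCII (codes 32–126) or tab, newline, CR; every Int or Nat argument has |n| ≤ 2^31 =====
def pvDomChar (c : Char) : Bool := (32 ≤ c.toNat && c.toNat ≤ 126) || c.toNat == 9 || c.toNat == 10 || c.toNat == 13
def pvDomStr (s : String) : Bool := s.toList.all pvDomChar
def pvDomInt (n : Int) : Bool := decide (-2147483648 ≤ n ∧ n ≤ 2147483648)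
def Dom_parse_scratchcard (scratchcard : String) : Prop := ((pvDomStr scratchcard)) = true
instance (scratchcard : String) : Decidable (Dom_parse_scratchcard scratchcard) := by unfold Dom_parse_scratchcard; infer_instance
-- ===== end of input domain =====

-- B replaces A's stateful on_winning flag scan by finding the '|' boundary once and running
-- two independent cleaned-token filter passes (objective: simpler decomposition, same cost).

-- ===== PORT A =====
-- one loop iteration of A: clean the token, then branch exactly as A does.
-- isnumeric is ported as strIsdigit (exact on the ASCII domain); int(t) is gated by the
-- digit test, so ofStr? is always some there and getD 0 is exact.
def pvStepA (st : List Int × List Int × Bool) (t : String) : List Int × List Int × Bool :=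
  let t := PySem.Str.replace t "\n" ""
  if t == "|" then (st.1, st.2.1, false)
  else if PySem.Str.strIsdigit t then
    (if st.2.2 then (st.1 ++ [(PySem.Int.ofStr? t).getD 0], st.2.1, st.2.2)
     else (st.1, st.2.1 ++ [(PySem.Int.ofStr? t).getD 0], st.2.2))
  else st

def parse_scratchcard (scratchcard : String) : List Int × List Int :=
  -- for i in range(2, len(splits)): each iteration touches only splits[i], so the loop is
  -- the fold of pvStepA over the tokens from index 2 on.
  let st := ((((PySem.Str.split? scratchcard " ").getD []).drop 2).foldl pvStepA ([], [], true))
  (st.1, st.2.1)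

-- ===== PORT B =====
-- [int(t) for t in l if t.isnumeric()] (isnumeric = strIsdigit on ASCII; int exact as above)
def pvPick (l : List String) : List Int :=
  (l.filter PySem.Str.strIsdigit).map (fun t => (PySem.Int.ofStr? t).getD 0)

def parse_scratchcard_alt (scratchcard : String) : List Int × List Int :=
  let tokens := (((PySem.Str.split? scratchcard " ").getD []).drop 2).map
    (fun t => PySem.Str.replace t "\n" "")
  match PySem.List.index? tokens "|" with   -- the pipe-membership test and index() of B become one index? match
  | some idx => (pvPick (tokens.take idx), pvPick (tokens.drop (idx + 1)))
  | none => (pvPick tokens, [])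

-- ===== PRECONDITION & SPEC =====
def Spec_parse_scratchcard (scratchcard : String) (out : List Int × List Int) : Prop := out = parse_scratchcard_alt scratchcard
instance (scratchcard : String) (out : List Int × List Int) : Decidable (Spec_parse_scratchcard scratchcard out) := by unfold Spec_parse_scratchcard; infer_instance

-- ===== CLAIM (what is proved, stated in full; the proofs are below) =====
def Claim_equal_parse_scratchcard : Prop := ∀ (scratchcard : String), Dom_parse_scratchcard scratchcard → Spec_parse_scratchcard scratchcard (parse_scratchcard scratchcard)

-- ===== LEMMAS AND PROOFS =====

-- A's step on an already-cleaned token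
def pvStepC (st : List Int × List Int × Bool) (t : String) : List Int × List Int × Bool :=
  if t == "|" then (st.1, st.2.1, false)
  else if PySem.Str.strIsdigit t then
    (if st.2.2 then (st.1 ++ [(PySem.Int.ofStr? t).getD 0], st.2.1, st.2.2)
     else (st.1, st.2.1 ++ [(PySem.Int.ofStr? t).getD 0], st.2.2))
  else st

lemma pvStepA_eq (st : List Int × List Int × Bool) (t : String) :
    pvStepA st t = pvStepC st (PySem.Str.replace t "\n" "") := rfl

lemma pvFoldA_eq (l : List String) (st : List Int × List Int × Bool) :
    l.foldl pvStepA st = (l.map (fun t => PySem.Str.replace t "\n" "")).foldl pvStepC st := by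
  rw [List.foldl_map]
  have h : (fun (st : List Int × List Int × Bool) (t : String) =>
      pvStepC st (PySem.Str.replace t "\n" "")) = pvStepA := by
    funext st t; exact (pvStepA_eq st t).symm
  rw [h]

lemma pvBar_not_digit : PySem.Chars.strIsdigit ['|'] = false := by decide

lemma pvFold_false (l : List String) (w y : List Int) :
    l.foldl pvStepC (w, y, false) = (w, y ++ pvPick l, false) := by
  induction l generalizing y with
  | nil => simp [pvPick]
  | cons t tl ih =>
    by_cases hb : t = "|"
    · subst hb
      simp [List.foldl_cons, pvStepC, ih, pvPick, pvBar_not_digit]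
    · simp only [List.foldl_cons, pvStepC, beq_iff_eq, hb, if_false]
      by_cases hd : PySem.Str.strIsdigit t = true
      · rw [PySem.Str.strIsdigit_eq] at hd
        simp [hd, ih, pvPick]
      · rw [PySem.Str.strIsdigit_eq] at hd
        simp [hd, ih, pvPick]

lemma pvFold_true (l : List String) (w y : List Int) :
    l.foldl pvStepC (w, y, true) =
      match PySem.List.index? l "|" with
      | some i => (w ++ pvPick (l.take i), y ++ pvPick (l.drop (i + 1)), false)
      | none => (w ++ pvPick l, y, true) := by
  induction l generalizing w with
  | nil => simp [pvPick]
  | cons t tl ih =>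
    by_cases hb : t = "|"
    · subst hb
      rw [PySem.List.index?_cons_self]
      simp only [List.foldl_cons, pvStepC, beq_self_eq_true, if_true]
      simpa [pvPick] using pvFold_false tl w y
    · rw [PySem.List.index?_cons_of_ne tl hb]
      simp only [List.foldl_cons, pvStepC, beq_iff_eq, hb, if_false, PySem.Str.strIsdigit_eq]
      cases h : PySem.List.index? tl "|" with
      | some i =>
        by_cases hd : PySem.Chars.strIsdigit t.toList = true
        · rw [if_pos hd, if_pos trivial, ih, h]
          simp [pvPick, List.filter_cons, PySem.Str.strIsdigit_eq, hd]
        · rw [if_neg hd, ih, h]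
          simp [pvPick, List.filter_cons, PySem.Str.strIsdigit_eq, hd]
      | none =>
        by_cases hd : PySem.Chars.strIsdigit t.toList = true
        · rw [if_pos hd, if_pos trivial, ih, h]
          simp [pvPick, List.filter_cons, PySem.Str.strIsdigit_eq, hd]
        · rw [if_neg hd, ih, h]
          simp [pvPick, List.filter_cons, PySem.Str.strIsdigit_eq, hd]

-- ===== VERDICT (by name: the statement is the Claim_ definition above) =====
theorem parse_scratchcard_spec : Claim_equal_parse_scratchcard := by
  intro s _
  unfold Spec_parse_scratchcard parse_scratchcard parse_scratchcard_alt
  rw [pvFoldA_eq, pvFold_true]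
  cases h : PySem.List.index? ((((PySem.Str.split? s " ").getD []).drop 2).map
      (fun t => PySem.Str.replace t "\n" "")) "|" with
  | some i =>
    rw [PySem.List.index?_eq_idxOf?] at h
    simp only [List.map_drop] at h
    simp [h]
  | none =>
    rw [PySem.List.index?_eq_idxOf?] at h
    simp only [List.map_drop] at h
    simp [h]
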